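-- pv_equiv track=rewrite | github.com/paskal98/WebPulseGPT | agent/JS_parser.py | find_event_listeners_by_variable
-- ===== SOURCE A (Python) =====
-- def find_event_listeners_by_variable(code, variable_name):
--     event_listeners = []
--
--     # Split the code by lines
--     lines = code.split('\n')
--
--     # Flags to indicate when we are within an event listener block
--     in_event_listener = False
--     brace_count = 0
--     event_listener_start = ""
--
--     for line in lines:
--         if f'{variable_name}.addEventListener(' in line and not in_event_listener:
--             in_event_listener = True
--             event_listener_start = line
--             brace_count += line.count('{') - line.count('}')
--             if brace_count == 0:  # Single line event listener
--                 event_listeners.append(event_listener_start)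
--                 in_event_listener = False
--             continue
--
--         if in_event_listener:
--             brace_count += line.count('{') - line.count('}')
--             event_listener_start += '\n' + line
--             if brace_count == 0:
--                 # We've reached the end of the event listener callback
--                 event_listeners.append(event_listener_start.strip())
--                 in_event_listener = False
--                 event_listener_start = ""
--
--     if not event_listeners:
--         return "Event listener not found"
--     else:
--         # Formatting the results
--         formatted_output = "\n\n".join(event_listeners)
--         return formatted_output
-- ===== SOURCE B (Python) =====
-- def find_event_listeners_by_variable(code, variable_name):
--     needle = variable_name + '.addEventListener('
--
--     def consume(rest, acc, bal):
--         # Inner scan: swallow lines into the open block until braces balance.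
--         # Returns ([block], remaining lines) on close, ([], []) if never closed.
--         if not rest:
--             return [], []
--         acc = acc + '\n' + rest[0]
--         bal += rest[0].count('{') - rest[0].count('}')
--         if bal == 0:
--             return [acc.strip()], rest[1:]
--         return consume(rest[1:], acc, bal)
--
--     def scan(lines):
--         # Outer scan: find each listener start, delegate its body to consume.
--         if not lines:
--             return []
--         line, rest = lines[0], lines[1:]
--         if needle not in line:
--             return scan(rest)
--         bal = line.count('{') - line.count('}')
--         if bal == 0:
--             return [line] + scan(rest)
--         block, rest2 = consume(rest, line, bal)
--         return block + scan(rest2)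
--
--     blocks = scan(code.split('\n'))
--     return "\n\n".join(blocks) if blocks else "Event listener not found"
-- ===== Notes on version B (the rewrite author's own statement) =====
-- stated objective: alternative
-- what changed: Replaces A's single pass with flag/brace-count/accumulator state variables by a two-level recursive decomposition: an outer scan that finds each listener start line and an inner consumer that swallows the block's lines until braces balance, returning the block and the remaining lines.
import Mathlib
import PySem

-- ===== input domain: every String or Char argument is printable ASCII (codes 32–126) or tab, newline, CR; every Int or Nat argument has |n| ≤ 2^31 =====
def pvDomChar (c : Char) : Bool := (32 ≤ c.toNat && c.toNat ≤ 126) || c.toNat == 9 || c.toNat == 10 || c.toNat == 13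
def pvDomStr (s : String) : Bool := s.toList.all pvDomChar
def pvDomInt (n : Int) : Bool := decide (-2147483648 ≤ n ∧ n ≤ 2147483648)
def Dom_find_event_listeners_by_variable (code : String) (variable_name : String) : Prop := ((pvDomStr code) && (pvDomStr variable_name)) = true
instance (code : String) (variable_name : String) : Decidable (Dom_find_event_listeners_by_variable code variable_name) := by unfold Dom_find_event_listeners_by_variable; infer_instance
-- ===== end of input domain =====

-- B rewrites A's one-pass flag/brace-count/accumulator loop as an outer scan + inner block consumer
-- (recursive decomposition); same cost, no speed claim.

-- line.count('{') - line.count('}')  (both Pythons compute this same expression)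
def pvDelta (line : String) : Int :=
  (PySem.Str.count line "{" : Int) - (PySem.Str.count line "}" : Int)

-- code.split('\n'): sep is the nonempty literal "\n", so Python's split never raises and
-- PySem.Str.split? is `some`; .getD [] only strips the option.
def pvSplitLines (code : String) : List String :=
  (PySem.Str.split? code "\n").getD []

-- ===== PORT A =====
-- loop state: (event_listeners, in_event_listener, brace_count, event_listener_start)
def pvLoopA (needle : String) (s : List String × Bool × Int × String) (line : String) :
    List String × Bool × Int × String :=
  let (els, inEL, bc, st) := s
  if PySem.Str.isIn needle line && !inEL then
    let st' := line
    let bc' := bc + pvDelta line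
    if bc' = 0 then (els ++ [st'], false, bc', st')
    else (els, true, bc', st')
  else if inEL then
    let bc' := bc + pvDelta line
    let st' := st ++ "\n" ++ line
    if bc' = 0 then (els ++ [PySem.Str.strip st'], false, bc', "")
    else (els, true, bc', st')
  else (els, inEL, bc, st)

def find_event_listeners_by_variable (code : String) (variable_name : String) : String :=
  let lines := pvSplitLines code
  let needle := variable_name ++ ".addEventListener("
  let r := List.foldl (pvLoopA needle) ([], false, (0 : Int), "") lines
  if r.1 = [] then "Event listener not found"
  else PySem.Str.join "\n\n" r.1

-- ===== PORT B =====
-- inner scan: swallow lines into the open block until the braces balance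
def pvConsume : List String → String → Int → List String × List String
  | [], _, _ => ([], [])
  | l :: rest, acc, bal =>
    let acc' := acc ++ "\n" ++ l
    let bal' := bal + pvDelta l
    if bal' = 0 then ([PySem.Str.strip acc'], rest)
    else pvConsume rest acc' bal'

theorem pvConsume_snd_length_le (ls : List String) (acc : String) (bal : Int) :
    (pvConsume ls acc bal).2.length ≤ ls.length := by
  induction ls generalizing acc bal with
  | nil => simp [pvConsume]
  | cons l rest ih =>
    simp only [pvConsume]
    split
    · simp
    · exact Nat.le_trans (ih _ _) (Nat.le_succ _)

-- outer scan: find each listener start line, delegate its body to pvConsume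
def pvScan (needle : String) : List String → List String
  | [] => []
  | line :: rest =>
    if PySem.Str.isIn needle line then
      if pvDelta line = 0 then line :: pvScan needle rest
      else
        let cr := pvConsume rest line (pvDelta line)
        cr.1 ++ pvScan needle cr.2
    else pvScan needle rest
termination_by ls => ls.length
decreasing_by
  · simp
  · exact Nat.lt_succ_of_le (pvConsume_snd_length_le _ _ _)
  · simp

def find_event_listeners_by_variable_alt (code : String) (variable_name : String) : String :=
  let needle := variable_name ++ ".addEventListener("
  let blocks := pvScan needle (pvSplitLines code)
  if blocks = [] then "Event listener not found"
  else PySem.Str.join "\n\n" blocks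

-- ===== PRECONDITION & SPEC =====
def Spec_find_event_listeners_by_variable (code : String) (variable_name : String) (out : String) : Prop := out = find_event_listeners_by_variable_alt code variable_name
instance (code : String) (variable_name : String) (out : String) : Decidable (Spec_find_event_listeners_by_variable code variable_name out) := by unfold Spec_find_event_listeners_by_variable; infer_instance

-- ===== CLAIM (what is proved, stated in full; the proofs are below) =====
def Claim_equal_find_event_listeners_by_variable : Prop := ∀ (code : String) (variable_name : String), Dom_find_event_listeners_by_variable code variable_name → Spec_find_event_listeners_by_variable code variable_name (find_event_listeners_by_variable code variable_name)

-- ===== LEMMAS AND PROOFS =====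

-- Both invariants at once (the two loop states call each other, so strong induction on length):
-- from the idle state A's fold collects exactly pvScan; from the in-listener state it collects
-- exactly pvConsume's block followed by pvScan of the remaining lines.
theorem pvBoth (needle : String) : ∀ (n : Nat) (ls : List String), ls.length = n →
    (∀ (els : List String) (st : String),
      (List.foldl (pvLoopA needle) (els, false, (0 : Int), st) ls).1 = els ++ pvScan needle ls) ∧
    (∀ (els : List String) (bc : Int) (st : String),
      (List.foldl (pvLoopA needle) (els, true, bc, st) ls).1
        = els ++ (pvConsume ls st bc).1 ++ pvScan needle (pvConsume ls st bc).2) := by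
  intro n
  induction n using Nat.strong_induction_on with
  | _ n ih =>
    intro ls hlen
    cases ls with
    | nil => constructor <;> intros <;> simp [pvScan, pvConsume]
    | cons line rest =>
      have hrest : rest.length < n := by simp at hlen; omega
      have h1 := (ih rest.length hrest rest rfl).1
      have h2 := (ih rest.length hrest rest rfl).2
      constructor
      · intro els st
        simp only [List.foldl_cons, pvLoopA, Bool.not_false, Bool.and_true]
        rw [pvScan]
        by_cases hin : PySem.Str.isIn needle line = true
        · rw [if_pos hin, if_pos hin]
          by_cases hz : (0 : Int) + pvDelta line = 0
          · have hz' : pvDelta line = 0 := by omega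
            rw [if_pos hz, if_pos hz', hz, h1 (els ++ [line]) line]
            simp [List.append_assoc]
          · have hz' : ¬ pvDelta line = 0 := by omega
            have hzz : (0 : Int) + pvDelta line = pvDelta line := by ring
            rw [if_neg hz, if_neg hz', h2 els _ line, hzz]
            simp [List.append_assoc]
        · rw [if_neg hin, if_neg hin]
          simp only [Bool.false_eq_true, if_false]
          rw [h1 els st]
      · intro els bc st
        simp only [List.foldl_cons, pvLoopA, Bool.not_true, Bool.and_false,
          Bool.false_eq_true, if_false, if_true]
        simp only [pvConsume]
        by_cases hz : bc + pvDelta line = 0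
        · rw [if_pos hz, if_pos hz, hz, h1 (els ++ [PySem.Str.strip (st ++ "\n" ++ line)]) ""]
        · rw [if_neg hz, if_neg hz, h2 els _ (st ++ "\n" ++ line)]

-- ===== VERDICT (by name: the statement is the Claim_ definition above) =====
theorem find_event_listeners_by_variable_spec : Claim_equal_find_event_listeners_by_variable := by
  intro code variable_name _
  unfold Spec_find_event_listeners_by_variable
  unfold find_event_listeners_by_variable find_event_listeners_by_variable_alt
  have h := (pvBoth (variable_name ++ ".addEventListener(")
      (pvSplitLines code).length (pvSplitLines code) rfl).1 [] ""
  simp only [List.nil_append] at h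
  simp only [h]
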